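-- pv_equiv track=rewrite | github.com/echuawu/sonic-mgmt | ngts/tests_nvos/platform/test_platform_transceiver.py | _get_asic_number
-- ===== SOURCE A (Python) =====
-- def _get_asic_number(module_name):
--     letter_in_module_to_asic = {
--         "A": "0",
--         "B": "1",
--         "C": "2",
--         "D": "3"
--     }
--     for letter, value in letter_in_module_to_asic.items():
--         if letter in module_name:
--             return value
--     return "0"
-- ===== SOURCE B (Python) =====
-- def _get_asic_number(module_name):
--     present = set(module_name) & {"A", "B", "C", "D"}
--     if present:
--         return {"A": "0", "B": "1", "C": "2", "D": "3"}[min(present)]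
--     return "0"
-- ===== Notes on version B (the rewrite author's own statement) =====
-- stated objective: simpler
-- what changed: Replaces the priority-ordered early-return membership loop over the dict items by a set intersection of the string's characters with the four ASIC letters followed by min (which matches the letter-priority of the loop) and a single dict lookup.
import Mathlib
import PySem

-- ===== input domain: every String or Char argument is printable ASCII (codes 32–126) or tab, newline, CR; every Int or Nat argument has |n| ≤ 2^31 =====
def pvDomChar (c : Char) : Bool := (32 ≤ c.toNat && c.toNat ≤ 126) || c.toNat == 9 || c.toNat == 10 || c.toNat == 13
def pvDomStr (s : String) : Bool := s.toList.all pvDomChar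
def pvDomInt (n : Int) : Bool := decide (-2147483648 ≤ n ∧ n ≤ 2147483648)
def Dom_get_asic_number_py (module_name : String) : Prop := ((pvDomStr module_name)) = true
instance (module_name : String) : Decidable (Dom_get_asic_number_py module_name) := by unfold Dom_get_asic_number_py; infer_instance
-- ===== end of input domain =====

-- B replaces A's priority-ordered early-return membership loop by set-intersection-then-min; objective: simpler.

-- ===== PORT A =====
-- the 'for letter, value in …items(): if letter in module_name: return value' loop
def getAsicLoop (module_name : String) : List (String × String) → String
  | [] => "0"
  | (letter, value) :: rest =>
      if PySem.Str.isIn letter module_name then value else getAsicLoop module_name rest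

def get_asic_number_py (module_name : String) : String :=
  getAsicLoop module_name (PySem.Dict.mk [("A", "0"), ("B", "1"), ("C", "2"), ("D", "3")]).items

-- ===== PORT B =====
def get_asic_number_py_alt (module_name : String) : String :=
  let present := PySem.Set.inter (PySem.Set.ofList module_name.toList)
                                 (PySem.Set.ofList ['A', 'B', 'C', 'D'])
  match PySem.List.min? present (fun c => c) with
  | some c => (PySem.Dict.mk [('A', "0"), ('B', "1"), ('C', "2"), ('D', "3")]).getD c "0"
  | none => "0"

-- ===== PRECONDITION & SPEC =====
def Spec_get_asic_number_py (module_name : String) (out : String) : Prop := out = get_asic_number_py_alt module_name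
instance (module_name : String) (out : String) : Decidable (Spec_get_asic_number_py module_name out) := by unfold Spec_get_asic_number_py; infer_instance

-- ===== CLAIM (what is proved, stated in full; the proofs are below) =====
def Claim_equal_get_asic_number_py : Prop := ∀ (module_name : String), Dom_get_asic_number_py module_name → Spec_get_asic_number_py module_name (get_asic_number_py module_name)

-- ===== LEMMAS AND PROOFS =====

-- 'letter in module_name' for a one-char letter is char membership
theorem chars_isIn_singleton (c : Char) (l : List Char) :
    PySem.Chars.isIn [c] l = decide (c ∈ l) := by
  by_cases h : c ∈ l
  · simp only [h, decide_true]
    refine (PySem.Chars.isIn_iff_infix _ _).mpr ?_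
    obtain ⟨p, r, hs⟩ := List.append_of_mem h
    exact ⟨p, r, by rw [hs]; simp⟩
  · simp only [h, decide_false]
    refine (PySem.Chars.isIn_eq_false_iff _ _).mpr (fun hinf => h (hinf.subset (by simp)))

theorem mem_present_iff (s : String) (c : Char) :
    c ∈ PySem.Set.inter (PySem.Set.ofList s.toList) (PySem.Set.ofList ['A', 'B', 'C', 'D'])
      ↔ c ∈ s.toList ∧ (c = 'A' ∨ c = 'B' ∨ c = 'C' ∨ c = 'D') := by
  simp [PySem.Set.mem_inter, PySem.Set.mem_ofList]

theorem min_present (s : String) (c : Char)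
    (hmem : c ∈ s.toList) (hset : c = 'A' ∨ c = 'B' ∨ c = 'C' ∨ c = 'D')
    (hmin : ∀ d, (d = 'A' ∨ d = 'B' ∨ d = 'C' ∨ d = 'D') → d ∈ s.toList → c ≤ d) :
    PySem.List.min? (PySem.Set.inter (PySem.Set.ofList s.toList)
        (PySem.Set.ofList ['A', 'B', 'C', 'D'])) (fun x => x) = some c := by
  set P := PySem.Set.inter (PySem.Set.ofList s.toList) (PySem.Set.ofList ['A', 'B', 'C', 'D']) with hP
  have hcP : c ∈ P := (mem_present_iff s c).mpr ⟨hmem, hset⟩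
  rcases hm : PySem.List.min? P (fun x => x) with _ | m
  · exact absurd ((PySem.List.min?_eq_none_iff _ _).mp hm ▸ hcP) (List.not_mem_nil)
  · have hmP : m ∈ P := PySem.List.min?_mem hm
    obtain ⟨hms, hmset⟩ := (mem_present_iff s m).mp hmP
    have h1 : m ≤ c := PySem.List.min?_isMin hm c hcP
    have h2 : c ≤ m := hmin m hmset hms
    exact congrArg some (le_antisymm h1 h2)

-- ===== VERDICT (by name: the statement is the Claim_ definition above) =====
theorem get_asic_number_py_spec : Claim_equal_get_asic_number_py := by
  intro s _
  unfold Spec_get_asic_number_py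
  by_cases hA : 'A' ∈ s.toList
  · have hm := min_present s 'A' hA (by simp) (fun d hd hds => by
      rcases hd with rfl | rfl | rfl | rfl <;> decide)
    simp [get_asic_number_py, getAsicLoop, get_asic_number_py_alt,
          PySem.Str.isIn, chars_isIn_singleton, hA, hm, PySem.Dict.getD, PySem.Dict.get?]
  · by_cases hB : 'B' ∈ s.toList
    · have hm := min_present s 'B' hB (by simp) (fun d hd hds => by
        rcases hd with rfl | rfl | rfl | rfl
        · exact absurd hds hA
        all_goals decide)
      simp [get_asic_number_py, getAsicLoop, get_asic_number_py_alt,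
            PySem.Str.isIn, chars_isIn_singleton, hA, hB, hm, PySem.Dict.getD, PySem.Dict.get?]
    · by_cases hC : 'C' ∈ s.toList
      · have hm := min_present s 'C' hC (by simp) (fun d hd hds => by
          rcases hd with rfl | rfl | rfl | rfl
          · exact absurd hds hA
          · exact absurd hds hB
          all_goals decide)
        simp [get_asic_number_py, getAsicLoop, get_asic_number_py_alt,
              PySem.Str.isIn, chars_isIn_singleton, hA, hB, hC, hm, PySem.Dict.getD, PySem.Dict.get?]
      · by_cases hD : 'D' ∈ s.toList
        · have hm := min_present s 'D' hD (by simp) (fun d hd hds => by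
            rcases hd with rfl | rfl | rfl | rfl
            · exact absurd hds hA
            · exact absurd hds hB
            · exact absurd hds hC
            · decide)
          simp [get_asic_number_py, getAsicLoop, get_asic_number_py_alt,
                PySem.Str.isIn, chars_isIn_singleton, hA, hB, hC, hD, hm, PySem.Dict.getD, PySem.Dict.get?]
        · have hnil : PySem.Set.inter (PySem.Set.ofList s.toList)
              (PySem.Set.ofList ['A', 'B', 'C', 'D']) = [] := by
            refine List.eq_nil_iff_forall_not_mem.mpr (fun c hc => ?_)
            obtain ⟨hcs, hcset⟩ := (mem_present_iff s c).mp hc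
            rcases hcset with rfl | rfl | rfl | rfl
            exacts [hA hcs, hB hcs, hC hcs, hD hcs]
          simp [get_asic_number_py, getAsicLoop, get_asic_number_py_alt,
                PySem.Str.isIn, chars_isIn_singleton, hA, hB, hC, hD, hnil, PySem.List.min?]
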